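-- pv_equiv track=rewrite | github.com/esaul314/chunkify | pdf_chunker/passes/emit_jsonl.py | _prefix_contained_len
-- ===== SOURCE A (Python) =====
-- _SENTENCE_TERMINATORS = ".?!"
--
-- _CLOSING_PUNCTUATION = "\"')]}"
--
-- def _has_sentence_ending(text: str) -> bool:
--     stripped = text.rstrip()
--     trimmed = stripped.rstrip(_CLOSING_PUNCTUATION)
--     return bool(trimmed) and trimmed[-1] in _SENTENCE_TERMINATORS
--
-- def _prefix_contained_len(haystack: str, needle: str) -> int:
--     length = len(needle)
--
--     def _match(index: int) -> bool:
--         segment = needle[:index]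
--         if not segment.strip():
--             return False
--         if index < length and not needle[index].isspace():
--             return False
--         if not _has_sentence_ending(segment):
--             return False
--         position = haystack.find(segment)
--         if position == -1:
--             return False
--         preceding = haystack[position - 1] if position else ""
--         return not preceding.isalnum()
--
--     return next((idx for idx in range(length, 0, -1) if _match(idx)), 0)
-- ===== SOURCE B (Python) =====
-- _SENTENCE_TERMINATORS = ".?!"
--
-- _CLOSING_PUNCTUATION = "\"')]}"
--
--
-- def _common_len(suffix, needle):
--     # length of the common prefix of suffix and needle
--     l = 0
--     for a, b in zip(suffix, needle):
--         if a != b: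
--             break
--         l += 1
--     return l
--
--
-- def _first_at_least(lcp, idx):
--     # first haystack position whose match length reaches idx, else -1
--     for p, l in enumerate(lcp):
--         if l >= idx:
--             return p
--     return -1
--
--
-- def _prefix_contained_len(haystack, needle):
--     n = len(needle)
--     # match-length table: lcp[p] = how far needle matches haystack starting at p
--     lcp = [_common_len(haystack[p:], needle) for p in range(len(haystack))]
--     # one forward pass over needle with a tiny state machine replacing the
--     # per-prefix rstrip work: sig_end = last non-closing char seen so far,
--     # sig = sig_end captured at the last non-whitespace char; sig is exactly
--     # the character _has_sentence_ending would examine for the prefix.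
--     cands = []
--     sig_end = None
--     sig = None
--     for i, c in enumerate(needle):
--         if c not in _CLOSING_PUNCTUATION:
--             sig_end = c
--         if not c.isspace():
--             sig = sig_end
--         idx = i + 1
--         if (idx == n or needle[idx].isspace()) and sig in (".", "?", "!"):
--             cands.append(idx)
--     # longest candidate whose first occurrence is cleanly preceded wins
--     for idx in reversed(cands):
--         p = _first_at_least(lcp, idx)
--         if p != -1 and (p == 0 or not haystack[p - 1].isalnum()):
--             return idx
--     return 0
-- ===== Notes on version B (the rewrite author's own statement) =====
-- stated objective: alternative
-- what changed: B never slices, rstrips or str.find()s per prefix: it builds a match-length (lcp) table of the haystack against the needle once and reads first occurrences from it, and finds the sentence-ending boundary candidates in one forward state-machine pass over the needle instead of A's descending per-index gate with two rstrips per prefix.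
import Mathlib
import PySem

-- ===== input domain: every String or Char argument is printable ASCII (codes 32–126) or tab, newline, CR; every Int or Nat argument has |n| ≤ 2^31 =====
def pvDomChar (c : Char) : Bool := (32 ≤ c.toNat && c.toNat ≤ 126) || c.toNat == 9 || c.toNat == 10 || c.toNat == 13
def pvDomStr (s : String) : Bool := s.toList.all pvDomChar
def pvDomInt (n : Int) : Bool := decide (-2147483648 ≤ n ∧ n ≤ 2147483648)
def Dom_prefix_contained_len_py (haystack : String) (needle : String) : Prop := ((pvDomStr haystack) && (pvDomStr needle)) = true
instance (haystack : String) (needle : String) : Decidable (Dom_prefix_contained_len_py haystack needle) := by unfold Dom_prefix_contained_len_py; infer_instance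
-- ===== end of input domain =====

-- B replaces A's per-prefix work (slice, rstrip twice, str.find) with a match-length (lcp)
-- table of the haystack built once plus a single forward state-machine pass over the needle
-- collecting the sentence-ending boundary candidates; objective: alternative.

-- needle[i].isspace() — A's boundary gate / B's candidate filter
def pvWsAt (n : List Char) (i : Int) : Bool :=
  (PySem.List.pyGet? n i).elim false PySem.Chars.isspace

-- ===== PORT A =====
-- hand port of str.rstrip("\"')]}" ) — exact: drops trailing chars from that set
def pvRstripClosing (text : List Char) : List Char :=
  (text.reverse.dropWhile (fun c => ['"', '\'', ')', ']', '}'].contains c)).reverse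

-- _has_sentence_ending
def pvHasSentenceEnding (text : List Char) : Bool :=
  let stripped := PySem.Chars.rstrip text
  let trimmed := pvRstripClosing stripped
  !trimmed.isEmpty && (PySem.List.pyGet? trimmed (-1)).elim false (fun c => ['.', '?', '!'].contains c)

def pvMatchA (haystack needle : List Char) (length index : Int) : Bool :=
  let segment := PySem.Chars.slice needle none (some index)
  if (PySem.Chars.strip segment).isEmpty then false
  else if decide (index < length) && !pvWsAt needle index then false
  else if !pvHasSentenceEnding segment then false
  else
    let position := PySem.Chars.find haystack segment
    if position == -1 then false
    else
      let precedingIsAlnum :=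
        if position == 0 then false
        else (PySem.List.pyGet? haystack (position - 1)).elim false PySem.Chars.isalnum
      !precedingIsAlnum

def prefix_contained_len_py (haystack : String) (needle : String) : Int :=
  let length : Int := needle.toList.length
  ((PySem.List.pyRange length 0 (-1)).find? (pvMatchA haystack.toList needle.toList length)).getD 0

-- ===== PORT B =====
-- _common_len: the zip loop counting matching leading characters (break at first mismatch)
def pvCommonLen : List Char → List Char → Nat
  | a :: s, b :: t => if a == b then pvCommonLen s t + 1 else 0
  | _, _ => 0

-- _first_at_least: enumerate scan over the lcp table, position counter p
def pvFirstAtLeast (idx : Int) : Int → List Nat → Int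
  | _, [] => -1
  | p, l :: rest => if idx ≤ (l : Int) then p else pvFirstAtLeast idx (p + 1) rest

-- the forward pass over needle: state machine (sig_end, sig) + candidate collection
def pvCandsGo (nfull : List Char) (nLen : Nat) : Option Char → Option Char → Nat → List Char → List Int
  | _, _, _, [] => []
  | sigEnd, sig, i, c :: rest =>
    let sigEnd' := if ['"', '\'', ')', ']', '}'].contains c then sigEnd else some c
    let sig' := if PySem.Chars.isspace c then sig else sigEnd'
    let idx := i + 1
    if (idx == nLen || pvWsAt nfull (idx : Int)) && sig'.elim false (fun x => ['.', '?', '!'].contains x)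
    then (idx : Int) :: pvCandsGo nfull nLen sigEnd' sig' idx rest
    else pvCandsGo nfull nLen sigEnd' sig' idx rest

-- the final loop over reversed(cands)
def pvLoopB2 (h : List Char) (lcp : List Nat) : List Int → Int
  | [] => 0
  | idx :: rest =>
    let p := pvFirstAtLeast idx 0 lcp
    if p != -1 && (p == 0 || !((PySem.List.pyGet? h (p - 1)).elim false PySem.Chars.isalnum))
    then idx else pvLoopB2 h lcp rest

def prefix_contained_len_py_alt (haystack : String) (needle : String) : Int :=
  let h := haystack.toList
  let n := needle.toList
  let lcp := (List.range h.length).map (fun p => pvCommonLen (h.drop p) n)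
  pvLoopB2 h lcp (pvCandsGo n n.length none none 0 n).reverse

-- ===== PRECONDITION & SPEC =====
def Spec_prefix_contained_len_py (haystack : String) (needle : String) (out : Int) : Prop := out = prefix_contained_len_py_alt haystack needle
instance (haystack : String) (needle : String) (out : Int) : Decidable (Spec_prefix_contained_len_py haystack needle out) := by unfold Spec_prefix_contained_len_py; infer_instance

-- ===== CLAIM (what is proved, stated in full; the proofs are below) =====
def Claim_equal_prefix_contained_len_py : Prop := ∀ (haystack : String) (needle : String), Dom_prefix_contained_len_py haystack needle → Spec_prefix_contained_len_py haystack needle (prefix_contained_len_py haystack needle)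

-- ===== LEMMAS AND PROOFS =====

-- intermediate form of A (proof-side only): descending boundary candidates, checks inline
def pvCheckB (haystack needle : List Char) (idx : Int) : Bool :=
  let segment := PySem.Chars.slice needle none (some idx)
  if !pvHasSentenceEnding segment then false
  else
    let position := PySem.Chars.find haystack segment
    if position == -1 then false
    else position == 0 || !((PySem.List.pyGet? haystack (position - 1)).elim false PySem.Chars.isalnum)

def pvLoopB (haystack needle : List Char) : List Int → Int
  | [] => 0
  | idx :: rest => if pvCheckB haystack needle idx then idx else pvLoopB haystack needle rest

theorem pvHasSE_of_strip_empty (seg : List Char)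
    (h : (PySem.Chars.strip seg).isEmpty = true) : pvHasSentenceEnding seg = false := by
  have hall : ∀ x ∈ seg, PySem.Chars.isspace x := by
    simp only [PySem.Chars.strip, PySem.Chars.rstrip, PySem.Chars.lstrip,
      List.isEmpty_iff, List.reverse_eq_nil_iff, List.dropWhile_eq_nil_iff,
      List.mem_reverse] at h
    intro x hx
    have := (List.takeWhile_append_dropWhile (p := PySem.Chars.isspace) (l := seg))
    rw [← this] at hx
    rcases List.mem_append.mp hx with h1 | h1
    · exact List.mem_takeWhile_imp h1
    · exact h x h1
  have hr : PySem.Chars.rstrip seg = [] := by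
    simp only [PySem.Chars.rstrip, List.reverse_eq_nil_iff, List.dropWhile_eq_nil_iff, List.mem_reverse]
    exact hall
  simp [pvHasSentenceEnding, hr, pvRstripClosing]

theorem pvMatch_eq_check (h n : List Char) (L idx : Int)
    (hb : (decide (idx < L) && !pvWsAt n idx) = false) :
    pvMatchA h n L idx = pvCheckB h n idx := by
  unfold pvMatchA pvCheckB
  simp only [hb, Bool.false_eq_true, if_false]
  generalize hseg : PySem.Chars.slice n none (some idx) = seg
  by_cases hs : (PySem.Chars.strip seg).isEmpty = true
  · simp [hs, pvHasSE_of_strip_empty _ hs]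
  · generalize PySem.Chars.find h seg = pos
    cases hE : pvHasSentenceEnding seg
    · simp [hs]
    · by_cases hp : pos = -1
      · simp [hs, hp]
      · by_cases hz : pos = 0
        · simp [hs, hz]
        · simp [hs, hp, hz]

theorem pvMatch_skip (h n : List Char) (L idx : Int)
    (h1 : idx < L) (h2 : pvWsAt n idx = false) : pvMatchA h n L idx = false := by
  unfold pvMatchA
  simp [h1, h2]

theorem pvTail (h n : List Char) (L : Int) :
    ∀ k : Nat, (k : Int) < L →
      ((PySem.List.pyRange (k : Int) 0 (-1)).find? (pvMatchA h n L)).getD 0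
        = pvLoopB h n ((PySem.List.pyRange (k : Int) 0 (-1)).filter (pvWsAt n)) := by
  intro k
  induction k with
  | zero => intro _; rw [PySem.List.pyRange_neg_one_eq_nil (by norm_num)]; rfl
  | succ m ih =>
    have hcast : ((m + 1 : Nat) : Int) = (m : Int) + 1 := by push_cast; ring
    rw [hcast]
    intro hk
    have hcons : PySem.List.pyRange ((m : Int) + 1) 0 (-1)
        = ((m : Int) + 1) :: PySem.List.pyRange ((m : Int) + 1 - 1) 0 (-1) :=
      PySem.List.pyRange_neg_one_cons (by positivity)
    have hsub : ((m : Int) + 1 - 1) = (m : Int) := by ring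
    rw [hcons, hsub]
    cases hws : pvWsAt n ((m : Int) + 1)
    · rw [List.find?_cons_of_neg (by simp [pvMatch_skip h n L _ hk hws]),
          List.filter_cons_of_neg (by simp [hws])]
      exact ih (by omega)
    · rw [List.filter_cons_of_pos (by simp [hws])]
      have heq := pvMatch_eq_check h n L ((m : Int) + 1) (by simp [hws])
      cases hc : pvCheckB h n ((m : Int) + 1)
      · rw [List.find?_cons_of_neg (by simp [heq, hc])]
        show _ = if pvCheckB h n _ then _ else _
        rw [hc]
        simpa using ih (by omega)
      · rw [List.find?_cons_of_pos (by simp [heq, hc])]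
        show _ = if pvCheckB h n _ then _ else _
        rw [hc]
        rfl

theorem pvMain (h n : List Char) :
    ((PySem.List.pyRange ((n.length : Int)) 0 (-1)).find? (pvMatchA h n (n.length : Int))).getD 0
      = pvLoopB h n ((n.length : Int) ::
          ((PySem.List.pyRange ((n.length : Int) - 1) 0 (-1)).filter (pvWsAt n))) := by
  rcases Nat.eq_zero_or_pos n.length with h0 | hpos
  · rw [h0]
    rw [PySem.List.pyRange_neg_one_eq_nil (by norm_num), PySem.List.pyRange_neg_one_eq_nil (by norm_num)]
    cases hc : pvCheckB h n ((0 : Nat) : Int) <;> simp [pvLoopB]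
  · rw [PySem.List.pyRange_neg_one_cons (by positivity)]
    have heq := pvMatch_eq_check h n (n.length : Int) (n.length : Int) (by simp)
    cases hc : pvCheckB h n (n.length : Int)
    · rw [List.find?_cons_of_neg (by simp [heq, hc])]
      show _ = if pvCheckB h n _ then _ else _
      rw [hc]
      have hm : ((n.length - 1 : Nat) : Int) = (n.length : Int) - 1 := by omega
      rw [← hm]
      exact pvTail h n _ _ (by omega)
    · rw [List.find?_cons_of_pos (by simp [heq, hc])]
      show _ = if pvCheckB h n _ then _ else _
      rw [hc]
      rfl

-- ---------- B-side characterisations ----------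

-- the character the sentence-ending test examines, as a pure function of a prefix
def pvE (l : List Char) : Option Char := (pvRstripClosing l).getLast?
def pvS (l : List Char) : Option Char := (pvRstripClosing (PySem.Chars.rstrip l)).getLast?
def pvSeB (l : List Char) : Bool := (pvS l).elim false (fun x => ['.', '?', '!'].contains x)

theorem pvE_append (l : List Char) (c : Char) :
    pvE (l ++ [c]) = if ['"', '\'', ')', ']', '}'].contains c then pvE l else some c := by
  unfold pvE pvRstripClosing
  rw [List.reverse_append, List.reverse_singleton, List.singleton_append, List.dropWhile_cons]
  by_cases hc : (['"', '\'', ')', ']', '}'].contains c) = true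
  · rw [if_pos hc, if_pos hc]
  · rw [Bool.not_eq_true] at hc
    rw [if_neg (by simpa using hc), if_neg (by simpa using hc)]
    simp

theorem pvRstrip_append (l : List Char) (c : Char) :
    PySem.Chars.rstrip (l ++ [c]) = if PySem.Chars.isspace c then PySem.Chars.rstrip l else l ++ [c] := by
  by_cases hs : PySem.Chars.isspace c = true
  · simp [PySem.Chars.rstrip, List.reverse_append, hs]
  · simp [PySem.Chars.rstrip, List.reverse_append, hs]

theorem pvS_append (l : List Char) (c : Char) :
    pvS (l ++ [c]) = if PySem.Chars.isspace c then pvS l else pvE (l ++ [c]) := by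
  unfold pvS pvE
  rw [pvRstrip_append]
  by_cases hs : PySem.Chars.isspace c = true
  · simp [hs]
  · simp [hs]

theorem pvHasSE_eq_seB (l : List Char) : pvHasSentenceEnding l = pvSeB l := by
  have hrw : pvHasSentenceEnding l
      = (!(pvRstripClosing (PySem.Chars.rstrip l)).isEmpty &&
         (PySem.List.pyGet? (pvRstripClosing (PySem.Chars.rstrip l)) (-1)).elim false
           (fun c => ['.', '?', '!'].contains c)) := rfl
  rw [hrw]
  unfold pvSeB pvS
  generalize pvRstripClosing (PySem.Chars.rstrip l) = t
  match t with
  | [] => simp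
  | a :: ts =>
    rw [PySem.List.pyGet?_neg_ofNat (a :: ts) 1 (by norm_num) (by simp)]
    simp [List.getLast?_eq_getElem?]

-- boundary-and-sentence-end predicate on a candidate length
def pvPB (n : List Char) (idx : Nat) : Bool :=
  ((idx == n.length) || pvWsAt n (idx : Int)) && pvSeB (n.take idx)

-- one unfolding step of the forward pass, with the new states named
theorem pvCandsGo_cons (nfull : List Char) (nLen : Nat) (sigEnd sig : Option Char)
    (i : Nat) (c : Char) (rest : List Char) (sigEnd' sig' : Option Char)
    (hE' : sigEnd' = if ['"', '\'', ')', ']', '}'].contains c then sigEnd else some c)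
    (hS' : sig' = if PySem.Chars.isspace c then sig else sigEnd') :
    pvCandsGo nfull nLen sigEnd sig i (c :: rest)
      = if ((i + 1 == nLen || pvWsAt nfull ((i + 1 : Nat) : Int))
            && sig'.elim false (fun x => ['.', '?', '!'].contains x))
        then ((i + 1 : Nat) : Int) :: pvCandsGo nfull nLen sigEnd' sig' (i + 1) rest
        else pvCandsGo nfull nLen sigEnd' sig' (i + 1) rest := by
  subst hS'; subst hE'; rfl

-- the forward pass produces exactly the ascending candidates
theorem pvCands_spec (n : List Char) :
    ∀ (rest : List Char) (i : Nat), rest = n.drop i →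
      pvCandsGo n n.length (pvE (n.take i)) (pvS (n.take i)) i rest
        = ((List.range' (i + 1) rest.length).filter (pvPB n)).map (fun (k : Nat) => (k : Int)) := by
  intro rest
  induction rest with
  | nil => intro i _; simp [pvCandsGo]
  | cons c rest ih =>
    intro i hdrop
    have hi : i < n.length := by
      by_contra hge
      rw [List.drop_eq_nil_of_le (by omega)] at hdrop
      exact List.cons_ne_nil c rest hdrop
    rw [List.drop_eq_getElem_cons hi] at hdrop
    injection hdrop with hc hrest
    have htake : n.take (i + 1) = n.take i ++ [c] := by
      rw [List.take_add_one]
      simp [List.getElem?_eq_getElem hi, hc]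
    have hE : pvE (n.take (i + 1))
        = if ['"', '\'', ')', ']', '}'].contains c then pvE (n.take i) else some c := by
      rw [htake, pvE_append]
    have hS : pvS (n.take (i + 1))
        = if PySem.Chars.isspace c then pvS (n.take i) else pvE (n.take (i + 1)) := by
      rw [htake, pvS_append, ← htake]
    rw [pvCandsGo_cons n n.length (pvE (n.take i)) (pvS (n.take i)) i c rest
          (pvE (n.take (i + 1))) (pvS (n.take (i + 1))) hE (by rw [hS])]
    rw [ih (i + 1) hrest]
    have hcond : ((i + 1 == n.length || pvWsAt n ((i + 1 : Nat) : Int))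
        && (pvS (n.take (i + 1))).elim false (fun x => ['.', '?', '!'].contains x))
        = pvPB n (i + 1) := rfl
    rw [hcond, List.length_cons, List.range'_succ, List.filter_cons]
    cases hP : pvPB n (i + 1)
    · simp
    · simp

-- common-prefix length reaches idx iff the idx-prefix of needle matches here
theorem pvCommonLen_ge (idx : Nat) : ∀ (xs ys : List Char), idx ≤ ys.length →
    (idx ≤ pvCommonLen xs ys ↔ ys.take idx <+: xs) := by
  induction idx with
  | zero => intro xs ys _; simp
  | succ m ih =>
    intro xs ys hlen
    match ys, xs with
    | [], _ => simp at hlen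
    | b :: ys, [] =>
      simp only [pvCommonLen, List.take_succ_cons]
      constructor
      · intro hle; omega
      · intro hpre; exact absurd (List.IsPrefix.length_le hpre) (by simp)
    | b :: ys, a :: xs =>
      simp only [pvCommonLen, List.take_succ_cons]
      by_cases hab : a = b
      · subst hab
        simp only [beq_self_eq_true, if_true, List.cons_prefix_cons]
        constructor
        · intro hle
          exact ⟨trivial, (ih xs ys (by simpa using hlen)).mp (by omega)⟩
        · intro ⟨_, hpre⟩
          have := (ih xs ys (by simpa using hlen)).mpr hpre
          omega
      · have : (a == b) = false := by simp [hab]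
        simp only [this, Bool.false_eq_true, if_false, List.cons_prefix_cons]
        constructor
        · intro hle; omega
        · intro ⟨hba, _⟩; exact absurd hba.symm hab

-- the lcp-table scan from position s finds str.find's first occurrence
theorem pvScan_eq_find (h n : List Char) (idx : Nat) (h1 : 1 ≤ idx) (h2 : idx ≤ n.length) :
    ∀ (cnt s : Nat), s + cnt = h.length →
      (∀ i, i < s → ¬ n.take idx <+: h.drop i) →
      pvFirstAtLeast (idx : Int) (s : Int)
          ((List.range' s cnt).map (fun p => pvCommonLen (h.drop p) n))
        = PySem.Chars.find h (n.take idx) := by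
  have hseg : (n.take idx).length = idx := by simp [h2]
  have hne : n.take idx ≠ [] := by
    intro hnil; rw [hnil] at hseg; simp at hseg; omega
  intro cnt
  induction cnt with
  | zero =>
    intro s hs hmin
    have hnone : ∀ i, ¬ n.take idx <+: h.drop i := by
      intro i hpre
      by_cases hi : i < s
      · exact hmin i hi hpre
      · have : h.drop i = [] := List.drop_eq_nil_of_le (by omega)
        rw [this] at hpre
        exact hne (List.prefix_nil.mp hpre)
    have : PySem.Chars.find h (n.take idx) = -1 := by
      rw [PySem.Chars.find_eq_neg_one_iff]
      intro hinf
      have := PySem.Chars.exists_prefix_drop_iff_isIn (s := h) (sub := n.take idx)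
      rw [PySem.Chars.isIn_iff_infix] at this
      obtain ⟨j, hj⟩ := this.mpr hinf
      exact hnone j hj
    rw [this]; rfl
  | succ m ih =>
    intro s hs hmin
    rw [List.range'_succ, List.map_cons]
    show (if (idx : Int) ≤ ((pvCommonLen (h.drop s) n : Nat) : Int) then (s : Int)
          else pvFirstAtLeast (idx : Int) ((s : Int) + 1) _) = _
    by_cases hq : idx ≤ pvCommonLen (h.drop s) n
    · rw [if_pos (by exact_mod_cast hq)]
      have hpre : n.take idx <+: h.drop s := (pvCommonLen_ge idx (h.drop s) n h2).mp hq
      have hinf : n.take idx <:+: h := by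
        rw [← PySem.Chars.isIn_iff_infix, ← PySem.Chars.exists_prefix_drop_iff_isIn]
        exact ⟨s, hpre⟩
      have hfge : (0 : Int) ≤ PySem.Chars.find h (n.take idx) := by
        rw [PySem.Chars.find_nonneg_iff]; exact hinf
      obtain ⟨hp, hmin'⟩ := PySem.Chars.find_spec (s := h) (sub := n.take idx) hfge
      have heq : (PySem.Chars.find h (n.take idx)).toNat = s := by
        by_contra hnee
        rcases Nat.lt_or_ge (PySem.Chars.find h (n.take idx)).toNat s with hlt | hge
        · exact hmin _ hlt hp
        · exact hmin' s (by omega) hpre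
      omega
    · rw [if_neg (by exact_mod_cast hq)]
      have : ((s : Int) + 1) = ((s + 1 : Nat) : Int) := by push_cast; ring
      rw [this]
      apply ih (s + 1) (by omega)
      intro i hi hpre
      by_cases his : i < s
      · exact hmin i his hpre
      · have : i = s := by omega
        subst this
        exact hq ((pvCommonLen_ge idx (h.drop i) n h2).mpr hpre)

-- str.find of the idx-prefix equals the lcp-table scan
theorem pvFind_eq_firstAtLeast (h n : List Char) (idx : Nat) (h1 : 1 ≤ idx) (h2 : idx ≤ n.length) :
    PySem.Chars.find h (n.take idx)
      = pvFirstAtLeast (idx : Int) 0 ((List.range h.length).map (fun p => pvCommonLen (h.drop p) n)) := by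
  rw [List.range_eq_range']
  exact (pvScan_eq_find h n idx h1 h2 h.length 0 (by omega) (by omega)).symm

-- the two loops agree elementwise on in-range candidates
theorem pvCheck_eq (h n : List Char) (k : Nat) (h1 : 1 ≤ k) (h2 : k ≤ n.length) :
    pvCheckB h n (k : Int)
      = (pvSeB (n.take k) &&
          (let p := pvFirstAtLeast (k : Int) 0 ((List.range h.length).map (fun q => pvCommonLen (h.drop q) n))
           p != -1 && (p == 0 || !((PySem.List.pyGet? h (p - 1)).elim false PySem.Chars.isalnum)))) := by
  have hslice : PySem.Chars.slice n none (some (k : Int)) = n.take k := by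
    simp [PySem.Chars.slice_eq_listSlice, PySem.List.slice_to_natCast]
  show (if !pvHasSentenceEnding (PySem.Chars.slice n none (some (k : Int))) then false
        else if PySem.Chars.find h (PySem.Chars.slice n none (some (k : Int))) == -1 then false
        else (PySem.Chars.find h (PySem.Chars.slice n none (some (k : Int))) == 0)
          || !((PySem.List.pyGet? h (PySem.Chars.find h (PySem.Chars.slice n none (some (k : Int))) - 1)).elim false PySem.Chars.isalnum)) = _
  rw [hslice, pvHasSE_eq_seB, ← pvFind_eq_firstAtLeast h n k h1 h2]
  cases hse : pvSeB (n.take k)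
  · simp
  · simp only [Bool.not_true, Bool.false_eq_true, if_false, Bool.true_and]
    generalize PySem.Chars.find h (n.take k) = pos
    by_cases hp : pos = -1
    · simp [hp]
    · simp [hp]

-- one unfolding step of B's final loop
theorem pvLoopB2_cons (h : List Char) (lcp : List Nat) (idx : Int) (rest : List Int) :
    pvLoopB2 h lcp (idx :: rest)
      = if (pvFirstAtLeast idx 0 lcp != -1
            && (pvFirstAtLeast idx 0 lcp == 0
                || !((PySem.List.pyGet? h (pvFirstAtLeast idx 0 lcp - 1)).elim false PySem.Chars.isalnum)))
        then idx else pvLoopB2 h lcp rest := rfl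

-- the two loops agree elementwise on in-range candidates
theorem pvLoops_eq (h n : List Char) :
    ∀ (L : List Nat), (∀ k ∈ L, 1 ≤ k ∧ k ≤ n.length) →
      pvLoopB h n (L.map (fun (k : Nat) => (k : Int)))
        = pvLoopB2 h ((List.range h.length).map (fun p => pvCommonLen (h.drop p) n))
            ((L.filter (fun k => pvSeB (n.take k))).map (fun (k : Nat) => (k : Int))) := by
  intro L
  induction L with
  | nil => intro _; rfl
  | cons k L ih =>
    intro hmem
    obtain ⟨hk1, hk2⟩ := hmem k List.mem_cons_self
    have hrec := ih (fun x hx => hmem x (List.mem_cons_of_mem _ hx))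
    rw [List.map_cons, List.filter_cons]
    show (if pvCheckB h n (k : Int) then (k : Int)
          else pvLoopB h n (L.map (fun (k : Nat) => (k : Int)))) = _
    rw [pvCheck_eq h n k hk1 hk2]
    cases hse : pvSeB (n.take k)
    · simpa [hse] using hrec
    · simp only [Bool.true_and, if_true, List.map_cons]
      rw [pvLoopB2_cons]
      cases hcond : (pvFirstAtLeast (k : Int) 0 ((List.range h.length).map (fun q => pvCommonLen (h.drop q) n)) != -1
          && (pvFirstAtLeast (k : Int) 0 ((List.range h.length).map (fun q => pvCommonLen (h.drop q) n)) == 0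
              || !((PySem.List.pyGet? h (pvFirstAtLeast (k : Int) 0 ((List.range h.length).map (fun q => pvCommonLen (h.drop q) n)) - 1)).elim false PySem.Chars.isalnum)))
      · simp only [Bool.false_eq_true, if_false]
        exact hrec
      · simp only [if_true]

-- A's descending candidate list is the boundary filter of [n..1]
theorem pvRangeDesc (n : Nat) (hn : 1 ≤ n) :
    PySem.List.pyRange ((n : Int) - 1) 0 (-1)
      = ((List.range' 1 (n - 1)).map (fun (k : Nat) => (k : Int))).reverse := by
  rw [PySem.List.pyRange_neg_one_eq_reverse]
  congr 1
  have h01 : (0 : Int) + 1 = 1 := by ring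
  rw [h01, show ((n : Int) - 1) + 1 = (n : Int) by ring]
  rw [PySem.List.pyRange_one, List.range'_eq_map_range, List.map_map]
  have hlen : ((n : Int) - 1).toNat = n - 1 := by omega
  rw [hlen]
  apply List.map_congr_left
  intro x _
  simp only [Function.comp_apply]
  push_cast
  ring

theorem pvListA_eq (n : List Char) (hn : 1 ≤ n.length) :
    ((n.length : Int) :: ((PySem.List.pyRange ((n.length : Int) - 1) 0 (-1)).filter (pvWsAt n)))
      = (((List.range' 1 n.length).reverse.filter
            (fun k => (k == n.length) || pvWsAt n (k : Int))).map (fun (k : Nat) => (k : Int))) := by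
  have hsplit : List.range' 1 n.length = List.range' 1 (n.length - 1) ++ [n.length] := by
    have h1 : n.length = (n.length - 1) + 1 := by omega
    rw [h1, List.range'_concat]
    congr 2
    omega
  rw [hsplit, List.reverse_append, List.reverse_singleton, List.singleton_append,
    List.filter_cons]
  simp only [beq_self_eq_true, Bool.true_or, if_true, List.map_cons]
  congr 1
  rw [pvRangeDesc n.length hn]
  simp only [List.filter_reverse, List.filter_map, List.map_reverse]
  congr 2
  apply List.filter_congr
  intro x hx
  have hxlt : x < n.length := by
    have := List.mem_range'_1.mp hx
    omega
  simp only [Function.comp_apply]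
  have hne : (x == n.length) = false := by simp; omega
  rw [hne, Bool.false_or]

theorem pvMainB (h n : List Char) :
    pvLoopB h n ((n.length : Int) ::
        ((PySem.List.pyRange ((n.length : Int) - 1) 0 (-1)).filter (pvWsAt n)))
      = pvLoopB2 h ((List.range h.length).map (fun p => pvCommonLen (h.drop p) n))
          (pvCandsGo n n.length none none 0 n).reverse := by
  have hcands : (pvCandsGo n n.length none none 0 n).reverse
      = (((List.range' 1 n.length).reverse.filter (pvPB n)).map (fun (k : Nat) => (k : Int))) := by
    have h0 : pvCandsGo n n.length none none 0 n
        = pvCandsGo n n.length (pvE (n.take 0)) (pvS (n.take 0)) 0 (n.drop 0) := rfl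
    rw [h0, pvCands_spec n (n.drop 0) 0 rfl]
    rw [List.filter_reverse, List.map_reverse]
    simp
  rcases Nat.eq_zero_or_pos n.length with h0 | hpos
  · rw [hcands, h0]
    have hnil : PySem.List.pyRange (((0 : Nat) : Int) - 1) 0 (-1) = [] :=
      PySem.List.pyRange_neg_one_eq_nil (by norm_num)
    rw [hnil]
    show (if pvCheckB h n ((0 : Nat) : Int) then ((0 : Nat) : Int) else pvLoopB h n []) = _
    cases hc : pvCheckB h n ((0 : Nat) : Int) <;> simp [pvLoopB, pvLoopB2]
  · rw [hcands, pvListA_eq n hpos]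
    have hfilter : (List.range' 1 n.length).reverse.filter (pvPB n)
        = ((List.range' 1 n.length).reverse.filter
              (fun k => (k == n.length) || pvWsAt n (k : Int))).filter
            (fun k => pvSeB (n.take k)) := by
      rw [List.filter_filter]
      apply List.filter_congr
      intro x _
      unfold pvPB
      rw [Bool.and_comm]
    rw [hfilter]
    apply pvLoops_eq h n
    intro k hk
    have := List.mem_range'.mp (List.mem_reverse.mp (List.mem_filter.mp hk).1)
    omega

-- ===== VERDICT (by name: the statement is the Claim_ definition above) =====
theorem prefix_contained_len_py_spec : Claim_equal_prefix_contained_len_py := by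
  intro haystack needle _
  show _ = _
  unfold prefix_contained_len_py prefix_contained_len_py_alt
  exact (pvMain haystack.toList needle.toList).trans (pvMainB haystack.toList needle.toList)
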